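-- pv_equiv track=rewrite | github.com/floracharbo/MARL_local_electricity | src/post_analysis/log/organise_results.py | list_columns_that_vary_between_setups
-- ===== SOURCE A (Python) =====
-- def list_columns_that_vary_between_setups(setups, other_columns):
--     varied_columns = []
--     for i, setup_i in enumerate(setups):
--         for j, setup_j in enumerate(setups):
--             if i != j:
--                 columns_diff_i_j = [
--                     column
--                     for column, setup_i_, setup_j_ in zip(other_columns, setup_i, setup_j)
--                     if setup_i_ != setup_j_
--                 ]
--                 for column in columns_diff_i_j:
--                     if column not in varied_columns:
--                         varied_columns.append(column)
--
--     return varied_columns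
-- ===== SOURCE B (Python) =====
-- def list_columns_that_vary_between_setups(setups, other_columns):
--     # Each column's reference row is the first setup long enough to contain it;
--     # a column varies when some later row disagrees with its reference value.
--     n = len(setups)
--     varied = set()
--     varied_columns = []
--     covered = 0  # columns [0, covered) already have their reference row
--     for i, ref in enumerate(setups):
--         block = range(covered, min(len(ref), len(other_columns)))
--         covered = max(covered, len(ref))
--         for j in range(i + 1, n):
--             row = setups[j]
--             for k in block:
--                 if k < len(row) and k not in varied and ref[k] != row[k]:
--                     varied.add(k)
--                     column = other_columns[k]
--                     if column not in varied_columns: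
--                         varied_columns.append(column)
--     return varied_columns
-- ===== Notes on version B (the rewrite author's own statement) =====
-- stated objective: faster
-- what changed: A rescans every ordered pair of setups (O(n^2*m) comparisons); B assigns each column a reference row (the first setup long enough to contain it, tracked with a 'covered' watermark) and scans each later row once against the current reference block, marking varied column indices in a set, which emits exactly A's columns in A's first-appearance order.
import Mathlib
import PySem

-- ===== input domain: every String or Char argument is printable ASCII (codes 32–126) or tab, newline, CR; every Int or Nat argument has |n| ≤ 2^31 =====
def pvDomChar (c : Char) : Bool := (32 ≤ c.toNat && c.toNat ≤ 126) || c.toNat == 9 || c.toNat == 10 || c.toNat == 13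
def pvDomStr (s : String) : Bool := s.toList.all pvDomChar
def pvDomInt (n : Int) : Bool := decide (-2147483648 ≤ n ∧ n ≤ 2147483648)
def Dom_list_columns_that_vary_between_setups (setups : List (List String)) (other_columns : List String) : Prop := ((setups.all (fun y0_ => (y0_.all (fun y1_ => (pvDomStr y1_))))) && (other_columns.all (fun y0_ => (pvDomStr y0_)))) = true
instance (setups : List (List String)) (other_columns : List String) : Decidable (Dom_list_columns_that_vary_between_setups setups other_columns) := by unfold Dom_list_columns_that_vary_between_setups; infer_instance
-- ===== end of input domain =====

-- B replaces A's all-pairs rescan by one pass per later row against each column's reference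
-- row (the first row long enough to contain it), tracking varied columns in a set: O(n*m) work.


-- ===== PORT A =====
def list_columns_that_vary_between_setups (setups : List (List String)) (other_columns : List String) : List String :=
  (PySem.List.enumerate setups).foldl (fun varied_columns p =>
    (PySem.List.enumerate setups).foldl (fun varied_columns q =>
      if p.1 ≠ q.1 then
        ((other_columns.zip (p.2.zip q.2)).filterMap
            (fun t => if t.2.1 ≠ t.2.2 then some t.1 else none)).foldl
          (fun acc column => if column ∈ acc then acc else acc ++ [column]) varied_columns
      else varied_columns) varied_columns) []

-- ===== PORT B =====
-- Source B: each column's reference row is the first setup long enough to contain it; a column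
-- varies when some later row first disagrees with its reference value
def list_columns_that_vary_between_setups_alt (setups : List (List String)) (other_columns : List String) : List String :=
  ((PySem.List.enumerate setups).foldl
    (fun (st : (PySem.Set Int × List String) × Int) p =>
      let block := PySem.List.pyRange st.2 (min (p.2.length : Int) (other_columns.length : Int)) 1
      let covered := max st.2 (p.2.length : Int)
      ((PySem.List.pyRange (p.1 + 1) (setups.length : Int) 1).foldl
        (fun (st2 : PySem.Set Int × List String) j =>
          let row := PySem.List.pyGetD setups j []
          block.foldl
            (fun (st3 : PySem.Set Int × List String) k =>
              if k < (row.length : Int) ∧ ¬ PySem.Set.contains st3.1 k = true ∧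
                  PySem.List.pyGetD p.2 k "" ≠ PySem.List.pyGetD row k "" then
                (PySem.Set.add st3.1 k,
                 let column := PySem.List.pyGetD other_columns k ""
                 if column ∈ st3.2 then st3.2 else st3.2 ++ [column])
              else st3) st2) st.1, covered))
    ((PySem.Set.empty, []), 0)).1.2

-- ===== PRECONDITION & SPEC =====
def Spec_list_columns_that_vary_between_setups (setups : List (List String)) (other_columns : List String) (out : List String) : Prop := out = list_columns_that_vary_between_setups_alt setups other_columns
instance (setups : List (List String)) (other_columns : List String) (out : List String) : Decidable (Spec_list_columns_that_vary_between_setups setups other_columns out) := by unfold Spec_list_columns_that_vary_between_setups; infer_instance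

-- ===== CLAIM (what is proved, stated in full; the proofs are below) =====
def Claim_equal_list_columns_that_vary_between_setups : Prop := ∀ (setups : List (List String)) (other_columns : List String), Dom_list_columns_that_vary_between_setups setups other_columns → Spec_list_columns_that_vary_between_setups setups other_columns (list_columns_that_vary_between_setups setups other_columns)

-- ===== LEMMAS AND PROOFS =====

-- the first-occurrence dedup fold shared (as code shape) by both ports
def pvDed {α : Type} [DecidableEq α] (a l : List α) : List α :=
  l.foldl (fun acc c => if c ∈ acc then acc else acc ++ [c]) a

-- elements pvDed appends to its accumulator
def pvNew {α : Type} [DecidableEq α] (a l : List α) : List α :=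
  match l with
  | [] => []
  | x :: l => if x ∈ a then pvNew a l else x :: pvNew (a ++ [x]) l

theorem pvDed_append {α : Type} [DecidableEq α] (a u v : List α) :
    pvDed a (u ++ v) = pvDed (pvDed a u) v := List.foldl_append ..

theorem mem_pvDed {α : Type} [DecidableEq α] (a l : List α) (x : α) :
    x ∈ pvDed a l ↔ x ∈ a ∨ x ∈ l := by
  induction l generalizing a with
  | nil => simp [pvDed]
  | cons y l ih =>
    have h1 : pvDed a (y :: l) = pvDed (if y ∈ a then a else a ++ [y]) l := rfl
    rw [h1, ih]
    by_cases h : y ∈ a <;> simp [h] <;> aesop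

theorem pvDed_snoc {α : Type} [DecidableEq α] (a l : List α) (x : α) :
    pvDed a (l ++ [x]) = if x ∈ pvDed a l then pvDed a l else pvDed a l ++ [x] := by
  rw [pvDed_append]; rfl

theorem pvDed_eq_append_pvNew {α : Type} [DecidableEq α] (a l : List α) :
    pvDed a l = a ++ pvNew a l := by
  induction l generalizing a with
  | nil => simp [pvDed, pvNew]
  | cons x l ih =>
    by_cases h : x ∈ a <;> simp only [pvDed, pvNew, List.foldl_cons, if_pos, if_neg, h,
      ite_true, ite_false, reduceIte]
    · exact ih a
    · rw [show List.foldl _ (a ++ [x]) l = pvDed (a ++ [x]) l from rfl, ih]; simp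

theorem pvNew_of_nodup {α : Type} [DecidableEq α] (a l : List α) (hl : l.Nodup) :
    pvNew a l = l.filter (fun x => x ∉ a) := by
  induction l generalizing a with
  | nil => rfl
  | cons x l ih =>
    simp only [List.nodup_cons] at hl
    by_cases h : x ∈ a <;> simp [pvNew, h, List.filter_cons, ih _ hl.2]
    · exact List.filter_congr (by intro y hy; simp; intro hya; exact fun hyx => hl.1 (hyx ▸ hy))

-- dedup of a mapped list only depends on the dedup of the underlying list
theorem pvDed_map {α β : Type} [DecidableEq α] [DecidableEq β] (f : α → β) (s : List α) :
    pvDed [] ((pvDed [] s).map f) = pvDed [] (s.map f) := by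
  induction s using List.reverseRecOn with
  | nil => rfl
  | append_singleton s x ih =>
    by_cases h : x ∈ s
    · have h1 : pvDed ([] : List α) (s ++ [x]) = pvDed [] s := by
        rw [pvDed_snoc, if_pos ((mem_pvDed _ _ _).2 (Or.inr h))]
      have h2 : f x ∈ pvDed ([] : List β) (s.map f) :=
        (mem_pvDed _ _ _).2 (Or.inr (List.mem_map_of_mem h))
      simp only [List.map_append, List.map_cons, List.map_nil]
      rw [h1, pvDed_snoc, if_pos h2, ih]
    · have h1 : pvDed ([] : List α) (s ++ [x]) = pvDed [] s ++ [x] := by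
        rw [pvDed_snoc, if_neg]; rw [mem_pvDed]; simp [h]
      rw [h1]
      simp only [List.map_append, List.map_cons, List.map_nil]
      rw [pvDed_snoc, pvDed_snoc, ih]

-- ----- index-level descriptions of the data both programs traverse -----
def pvLen (setups : List (List String)) (i : Nat) : Nat := (setups.getD i []).length
def pvVal (setups : List (List String)) (k i : Nat) : String := (setups.getD i []).getD k ""

-- columns compared and found different by the pair (i, j)
def pvEmit (setups : List (List String)) (m : Nat) (i j : Nat) : List Nat :=
  (List.range (min m (min (pvLen setups i) (pvLen setups j)))).filter
    (fun k => pvVal setups k i ≠ pvVal setups k j)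

-- A's traversal order of ordered pairs
def pvP (n : Nat) : List (Nat × Nat) :=
  (List.range n).flatMap (fun i => ((List.range n).filter (fun j => i ≠ j)).map (fun j => (i, j)))

theorem mem_pvEmit (setups : List (List String)) (m i j k : Nat) :
    k ∈ pvEmit setups m i j ↔
      k < m ∧ k < pvLen setups i ∧ k < pvLen setups j ∧ pvVal setups k i ≠ pvVal setups k j := by
  simp only [pvEmit, List.mem_filter, List.mem_range, Nat.lt_min, decide_eq_true_eq]
  tauto

theorem pvEmit_nodup (setups : List (List String)) (m i j : Nat) : (pvEmit setups m i j).Nodup :=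
  List.Nodup.filter _ (List.nodup_range)

-- ----- normal form of port A -----
theorem foldl_pvDed_flat {α γ : Type} [DecidableEq α] (l : List γ) (g : γ → List α) (a : List α) :
    l.foldl (fun acc x => pvDed acc (g x)) a = pvDed a (l.flatMap g) := by
  induction l generalizing a with
  | nil => simp [pvDed]
  | cons x l ih => rw [List.foldl_cons, List.flatMap_cons, pvDed_append, ih]

theorem filter_flatMap {α β : Type} (l : List α) (p : α → Bool) (g : α → List β) :
    (l.filter p).flatMap g = l.flatMap (fun x => if p x then g x else []) := by
  induction l with
  | nil => simp
  | cons x l ih =>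
    rw [List.filter_cons]
    by_cases h : p x <;> simp [h, ih]

theorem enum_flat_gen {γ : Type} (xs : List (List String)) (s : Int) (f : Int × List String → List γ) :
    (PySem.List.enumerate xs s).flatMap f =
      (List.range xs.length).flatMap (fun (i : Nat) => f (s + (i : Int), xs.getD i [])) := by
  induction xs generalizing s with
  | nil => simp [PySem.List.enumerate]
  | cons x xs ih =>
    rw [PySem.List.enumerate_cons, List.flatMap_cons, List.length_cons, List.range_succ_eq_map,
      List.flatMap_cons, List.flatMap_map, ih (s + 1)]
    congr 1
    · norm_num
    · apply List.flatMap_congr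
      intro i _
      have h1 : s + ((i + 1 : Nat) : Int) = s + 1 + (i : Int) := by push_cast; ring
      have h2 : (x :: xs).getD (i + 1) [] = xs.getD i [] := by simp
      rw [show (Nat.succ i) = i + 1 from rfl, h1, h2]

theorem enum_flat {γ : Type} (xs : List (List String)) (f : Int × List String → List γ) :
    (PySem.List.enumerate xs).flatMap f =
      (List.range xs.length).flatMap (fun (i : Nat) => f ((i : Int), xs.getD i [])) := by
  rw [show PySem.List.enumerate xs = PySem.List.enumerate xs 0 from rfl, enum_flat_gen xs 0 f]
  apply List.flatMap_congr
  intro i _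
  norm_num

theorem zipdiff (oc si sj : List String) :
    (oc.zip (si.zip sj)).filterMap (fun t => if t.2.1 ≠ t.2.2 then some t.1 else none) =
      ((List.range (min oc.length (min si.length sj.length))).filter
        (fun k => si.getD k "" ≠ sj.getD k "")).map (fun k => oc.getD k "") := by
  induction oc generalizing si sj with
  | nil => simp
  | cons c oc ih =>
    cases si with
    | nil => simp
    | cons a si =>
      cases sj with
      | nil => simp
      | cons b sj =>
        simp only [List.zip_cons_cons, List.filterMap_cons, List.length_cons]
        have hmin : min (oc.length + 1) (min (si.length + 1) (sj.length + 1)) =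
            min oc.length (min si.length sj.length) + 1 := by omega
        rw [hmin, List.range_succ_eq_map, List.filter_cons]
        by_cases h : a ≠ b <;>
          simp [h, List.filter_map, List.map_map, Function.comp_def] <;>
          simpa using ih si sj

theorem portA_eq (setups : List (List String)) (oc : List String) :
    list_columns_that_vary_between_setups setups oc =
      pvDed [] (((pvP setups.length).flatMap
        (fun pr => pvEmit setups oc.length pr.1 pr.2)).map (fun k => oc.getD k "")) := by
  have hinner : ∀ (p : Int × List String) (acc : List String),
      (PySem.List.enumerate setups).foldl (fun acc q =>
        if p.1 ≠ q.1 then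
          ((oc.zip (p.2.zip q.2)).filterMap
              (fun t => if t.2.1 ≠ t.2.2 then some t.1 else none)).foldl
            (fun a column => if column ∈ a then a else a ++ [column]) acc
        else acc) acc =
      pvDed acc ((PySem.List.enumerate setups).flatMap (fun q =>
        if p.1 ≠ q.1 then
          (oc.zip (p.2.zip q.2)).filterMap (fun t => if t.2.1 ≠ t.2.2 then some t.1 else none)
        else [])) := by
    intro p acc
    rw [← foldl_pvDed_flat]
    apply List.foldl_ext
    intro a q _
    by_cases h : p.1 ≠ q.1
    · rw [if_pos h, if_pos h]; rfl
    · rw [if_neg h, if_neg h]; rfl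
  have hA : list_columns_that_vary_between_setups setups oc =
      pvDed [] ((PySem.List.enumerate setups).flatMap (fun p =>
        (PySem.List.enumerate setups).flatMap (fun q =>
          if p.1 ≠ q.1 then
            (oc.zip (p.2.zip q.2)).filterMap (fun t => if t.2.1 ≠ t.2.2 then some t.1 else none)
          else []))) := by
    rw [list_columns_that_vary_between_setups, ← foldl_pvDed_flat]
    apply List.foldl_ext
    intro a p _
    exact hinner p a
  rw [hA]
  rw [enum_flat]
  have hin2 : ∀ i : Nat, (PySem.List.enumerate setups).flatMap (fun (q : Int × List String) =>
      if (((i : Nat) : Int), setups.getD i []).1 ≠ q.1 then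
        (oc.zip (((((i : Nat) : Int), setups.getD i []).2).zip q.2)).filterMap
          (fun t => if t.2.1 ≠ t.2.2 then some t.1 else none)
      else []) =
      (List.range setups.length).flatMap (fun j =>
        if i ≠ j then
          ((pvEmit setups oc.length i j).map (fun k => oc.getD k ""))
        else []) := by
    intro i
    rw [enum_flat]
    apply List.flatMap_congr
    intro j _
    by_cases h : i = j
    · subst h; simp
    · have h1 : (((i : Int), setups.getD i []).1 : Int) ≠ (((j : Int), setups.getD j []).1 : Int) := by
        simpa using (by exact_mod_cast h : (i : Int) ≠ (j : Int))
      rw [if_pos h1, if_pos h, zipdiff]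
      rfl
  have hmid : (List.range setups.length).flatMap (fun i =>
      (PySem.List.enumerate setups).flatMap (fun (q : Int × List String) =>
        if (((i : Nat) : Int), setups.getD i []).1 ≠ q.1 then
          (oc.zip (((((i : Nat) : Int), setups.getD i []).2).zip q.2)).filterMap
            (fun t => if t.2.1 ≠ t.2.2 then some t.1 else none)
        else [])) =
      (List.range setups.length).flatMap (fun i =>
        (List.range setups.length).flatMap (fun j =>
          if i ≠ j then (pvEmit setups oc.length i j).map (fun k => oc.getD k "") else [])) := by
    apply List.flatMap_congr
    intro i _
    exact hin2 i
  rw [hmid, List.map_flatMap, pvP, List.flatMap_assoc]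
  congr 1
  apply List.flatMap_congr
  intro i _
  rw [List.flatMap_map, filter_flatMap]
  apply List.flatMap_congr
  intro j _
  by_cases h : i = j <;> simp [h]

-- ----- first differing pair of a column (proof-side characterisation) -----
def pvFirstPair (k : Nat) (l : List (List String)) (idx : Nat) (first : Option (Nat × String)) :
    Option (Nat × Nat) :=
  match l with
  | [] => none
  | s :: rest =>
    if h : k < s.length then
      match first with
      | none => pvFirstPair k rest (idx + 1) (some (idx, s[k]))
      | some (i0, v0) => if s[k] ≠ v0 then some (i0, idx) else pvFirstPair k rest (idx + 1) first
    else pvFirstPair k rest (idx + 1) first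

def pvKeyOf (setups : List (List String)) (k : Nat) : Option (Nat × Nat) :=
  pvFirstPair k setups 0 none

-- columns whose first differing pair is exactly pr
def pvOwn (setups : List (List String)) (m : Nat) (pr : Nat × Nat) : List Nat :=
  (pvEmit setups m pr.1 pr.2).filter (fun k => pvKeyOf setups k = some pr)

def pvLexLt (pr pr' : Nat × Nat) : Prop := pr.1 < pr'.1 ∨ (pr.1 = pr'.1 ∧ pr.2 < pr'.2)

theorem pvP_mem (n : Nat) (pr : Nat × Nat) :
    pr ∈ pvP n ↔ pr.1 < n ∧ pr.2 < n ∧ pr.1 ≠ pr.2 := by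
  obtain ⟨a, b⟩ := pr
  simp only [pvP, List.mem_flatMap, List.mem_map, List.mem_filter, List.mem_range,
    decide_eq_true_eq, Prod.mk.injEq]
  constructor
  · rintro ⟨i, hi, j, ⟨hj, hij⟩, rfl, rfl⟩; exact ⟨hi, hj, hij⟩
  · rintro ⟨ha, hb, hab⟩; exact ⟨a, ha, b, ⟨hb, hab⟩, rfl, rfl⟩

theorem pvP_pairwise (n : Nat) : (pvP n).Pairwise pvLexLt := by
  rw [pvP, List.pairwise_flatMap]
  constructor
  · intro i _
    refine List.Pairwise.map _ ?_ (List.Pairwise.filter _ (List.pairwise_lt_range))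
    intro j1 j2 hj
    exact Or.inr ⟨rfl, hj⟩
  · refine List.Pairwise.imp_of_mem ?_ (List.pairwise_lt_range)
    intro i1 i2 _ _ h12 x hx y hy
    obtain ⟨j1, _, rfl⟩ := List.mem_map.1 hx
    obtain ⟨j2, _, rfl⟩ := List.mem_map.1 hy
    exact Or.inl h12

theorem pvFirstPair_some_spec (k : Nat) (l : List (List String)) (idx i0 : Nat) (v0 : String)
    (i0' j0 : Nat) (h : pvFirstPair k l idx (some (i0, v0)) = some (i0', j0)) :
    i0' = i0 ∧ ∃ b, b < l.length ∧ j0 = idx + b ∧ k < (l.getD b []).length ∧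
      (l.getD b []).getD k "" ≠ v0 ∧
      (∀ b' < b, k < (l.getD b' []).length → (l.getD b' []).getD k "" = v0) := by
  induction l generalizing idx with
  | nil => simp [pvFirstPair] at h
  | cons s rest ih =>
    by_cases hlen : k < s.length
    · have hsk : s.getD k "" = s[k] := List.getD_eq_getElem s "" hlen
      simp only [pvFirstPair, dif_pos hlen] at h
      by_cases hne : s[k] ≠ v0
      · rw [if_pos hne] at h
        obtain ⟨h1, h2⟩ : i0' = i0 ∧ j0 = idx := by
          have := Option.some.inj h
          exact ⟨(Prod.mk.injEq .. ▸ this).1.symm, (Prod.mk.injEq .. ▸ this).2.symm⟩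
        refine ⟨h1, 0, by simp, by omega, by simpa using hlen, ?_, by omega⟩
        simp only [List.getD_cons_zero]
        rw [hsk]; exact hne
      · rw [if_neg hne] at h
        push_neg at hne
        obtain ⟨h1, b, hb, hj, hlb, hvb, hall⟩ := ih (idx + 1) h
        refine ⟨h1, b + 1, by simpa using hb, by omega, by simpa using hlb, by simpa using hvb, ?_⟩
        intro b' hb' hlb'
        cases b' with
        | zero => simp only [List.getD_cons_zero]; rw [hsk]; exact hne
        | succ b'' => exact hall b'' (by omega) (by simpa using hlb')
    · simp only [pvFirstPair, dif_neg hlen] at h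
      obtain ⟨h1, b, hb, hj, hlb, hvb, hall⟩ := ih (idx + 1) h
      refine ⟨h1, b + 1, by simpa using hb, by omega, by simpa using hlb, by simpa using hvb, ?_⟩
      intro b' hb' hlb'
      cases b' with
      | zero => simp at hlb'; omega
      | succ b'' => exact hall b'' (by omega) (by simpa using hlb')

theorem pvFirstPair_some_complete (k : Nat) (l : List (List String)) (idx i0 : Nat) (v0 : String)
    (b : Nat) (hb : b < l.length) (hlen : k < (l.getD b []).length)
    (hne : (l.getD b []).getD k "" ≠ v0) :
    pvFirstPair k l idx (some (i0, v0)) ≠ none := by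
  induction l generalizing idx b with
  | nil => simp at hb
  | cons s rest ih =>
    by_cases hl : k < s.length
    · simp only [pvFirstPair, dif_pos hl]
      by_cases hv : s[k] ≠ v0
      · simp [hv]
      · rw [if_neg hv]
        push_neg at hv
        cases b with
        | zero =>
          simp only [List.getD_cons_zero] at hne
          rw [List.getD_eq_getElem s "" hl] at hne
          exact absurd hv hne
        | succ b' => exact ih (idx + 1) b' (by simpa using hb) (by simpa using hlen) (by simpa using hne)
    · simp only [pvFirstPair, dif_neg hl]
      cases b with
      | zero => simp at hlen; omega
      | succ b' => exact ih (idx + 1) b' (by simpa using hb) (by simpa using hlen) (by simpa using hne)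

theorem pvFirstPair_none_spec (k : Nat) (l : List (List String)) (idx i0 j0 : Nat)
    (h : pvFirstPair k l idx none = some (i0, j0)) :
    ∃ a b, a < b ∧ b < l.length ∧ i0 = idx + a ∧ j0 = idx + b ∧
      k < (l.getD a []).length ∧ (∀ a' < a, ¬ k < (l.getD a' []).length) ∧
      k < (l.getD b []).length ∧
      (l.getD b []).getD k "" ≠ (l.getD a []).getD k "" ∧
      (∀ b', a < b' → b' < b → k < (l.getD b' []).length →
        (l.getD b' []).getD k "" = (l.getD a []).getD k "") := by
  induction l generalizing idx with
  | nil => simp [pvFirstPair] at h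
  | cons s rest ih =>
    by_cases hlen : k < s.length
    · have hsk : s.getD k "" = s[k] := List.getD_eq_getElem s "" hlen
      simp only [pvFirstPair, dif_pos hlen] at h
      obtain ⟨h1, b, hb, hj, hlb, hvb, hall⟩ := pvFirstPair_some_spec k rest (idx + 1) idx s[k] i0 j0 h
      refine ⟨0, b + 1, by omega, by simpa using hb, by omega, by omega, by simpa using hlen,
        by omega, by simpa using hlb, ?_, ?_⟩
      · simp only [List.getD_cons_succ, List.getD_cons_zero]
        rw [hsk]; exact hvb
      · intro b' h0 hb' hlb'
        cases b' with
        | zero => omega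
        | succ b'' =>
          simp only [List.getD_cons_succ, List.getD_cons_zero]
          rw [hsk]
          exact hall b'' (by omega) (by simpa using hlb')
    · simp only [pvFirstPair, dif_neg hlen] at h
      obtain ⟨a, b, hab, hb, hi, hj, hla, halla, hlb, hvb, hall⟩ := ih (idx + 1) h
      refine ⟨a + 1, b + 1, by omega, by simpa using hb, by omega, by omega, by simpa using hla,
        ?_, by simpa using hlb, by simpa using hvb, ?_⟩
      · intro a' ha'
        cases a' with
        | zero => simpa using hlen
        | succ a'' => simpa using halla a'' (by omega)
      · intro b' h0 hb' hlb'
        cases b' with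
        | zero => omega
        | succ b'' =>
          simpa using hall b'' (by omega) (by omega) (by simpa using hlb')

theorem pvFirstPair_none_complete (k : Nat) (l : List (List String)) (idx : Nat)
    (a b : Nat) (hab : a < b) (hb : b < l.length)
    (hla : k < (l.getD a []).length) (hlb : k < (l.getD b []).length)
    (hne : (l.getD a []).getD k "" ≠ (l.getD b []).getD k "") :
    pvFirstPair k l idx none ≠ none := by
  induction l generalizing idx a b with
  | nil => simp at hb
  | cons s rest ih =>
    by_cases hl : k < s.length
    · have hsk : s.getD k "" = s[k] := List.getD_eq_getElem s "" hl
      simp only [pvFirstPair, dif_pos hl]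
      cases a with
      | zero =>
        cases b with
        | zero => omega
        | succ b' =>
          simp only [List.getD_cons_zero, List.getD_cons_succ] at hne
          rw [hsk] at hne
          exact pvFirstPair_some_complete k rest (idx + 1) idx s[k] b' (by simpa using hb)
            (by simpa using hlb) (fun hx => hne hx.symm)
      | succ a' =>
        cases b with
        | zero => omega
        | succ b' =>
          simp only [List.getD_cons_succ] at hne hla hlb
          have hb'' : b' < rest.length := by simp at hb; omega
          have ha' : a' < rest.length := by omega
          by_cases hva : (rest.getD a' []).getD k "" = s[k]
          · exact pvFirstPair_some_complete k rest (idx + 1) idx s[k] b' hb''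
              hlb (fun hx => hne (by rw [hva, hx]))
          · exact pvFirstPair_some_complete k rest (idx + 1) idx s[k] a' ha' hla hva
    · simp only [pvFirstPair, dif_neg hl]
      cases a with
      | zero => simp at hla; omega
      | succ a' =>
        cases b with
        | zero => omega
        | succ b' =>
          exact ih (idx + 1) a' b' (by omega) (by simpa using hb) (by simpa using hla)
            (by simpa using hlb) (by simpa using hne)

theorem pvKeyOf_some_spec (setups : List (List String)) (k i0 j0 : Nat)
    (h : pvKeyOf setups k = some (i0, j0)) :
    i0 < j0 ∧ j0 < setups.length ∧ k < pvLen setups i0 ∧ k < pvLen setups j0 ∧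
      pvVal setups k i0 ≠ pvVal setups k j0 ∧
      (∀ i < i0, ¬ k < pvLen setups i) ∧
      (∀ j', i0 < j' → j' < j0 → k < pvLen setups j' → pvVal setups k j' = pvVal setups k i0) := by
  obtain ⟨a, b, hab, hb, hi, hj, hla, halla, hlb, hvb, hall⟩ := pvFirstPair_none_spec k setups 0 i0 j0 h
  subst hi hj
  simp only [Nat.zero_add] at *
  exact ⟨hab, hb, hla, hlb, fun hx => hvb hx.symm, halla, hall⟩

theorem pvKeyOf_complete (setups : List (List String)) (k i j : Nat)
    (hi : i < setups.length) (hj : j < setups.length) (hij : i ≠ j)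
    (hki : k < pvLen setups i) (hkj : k < pvLen setups j)
    (hne : pvVal setups k i ≠ pvVal setups k j) :
    ∃ pr, pvKeyOf setups k = some pr := by
  have hnn : pvFirstPair k setups 0 none ≠ none := by
    rcases Nat.lt_or_ge i j with hlt | hge
    · exact pvFirstPair_none_complete k setups 0 i j hlt hj hki hkj hne
    · exact pvFirstPair_none_complete k setups 0 j i (by omega) hi hkj hki (fun hx => hne hx.symm)
  cases hx : pvFirstPair k setups 0 none with
  | none => exact absurd hx hnn
  | some pr => exact ⟨pr, hx⟩

theorem pvKeyOf_min (setups : List (List String)) (k i0 j0 i j : Nat)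
    (h : pvKeyOf setups k = some (i0, j0))
    (hi : i < setups.length) (_hj : j < setups.length) (hij : i ≠ j)
    (hki : k < pvLen setups i) (hkj : k < pvLen setups j)
    (hne : pvVal setups k i ≠ pvVal setups k j) :
    i0 < i ∨ (i0 = i ∧ j0 ≤ j) := by
  obtain ⟨hab, hb, hla, hlb, hvb, halla, hall⟩ := pvKeyOf_some_spec setups k i0 j0 h
  have hii : i0 ≤ i := by by_contra hc; exact halla i (by omega) hki
  have hjj : i0 ≤ j := by by_contra hc; exact halla j (by omega) hkj
  rcases Nat.lt_or_ge i0 i with hlt | hge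
  · exact Or.inl hlt
  · have hieq : i0 = i := by omega
    subst hieq
    right
    refine ⟨rfl, ?_⟩
    by_contra hc
    push_neg at hc
    have hji : i0 < j := by omega
    exact hne (hall j hji (by omega) hkj).symm

theorem mem_pvOwn (setups : List (List String)) (m : Nat) (pr : Nat × Nat) (k : Nat) :
    k ∈ pvOwn setups m pr ↔ k < m ∧ pvKeyOf setups k = some pr := by
  constructor
  · intro h
    have he := List.mem_of_mem_filter h
    have hkey := List.of_mem_filter h
    simp only [decide_eq_true_eq] at hkey
    exact ⟨((mem_pvEmit ..).1 he).1, hkey⟩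
  · rintro ⟨hm, hk⟩
    obtain ⟨hab, hbn, hla, hlb, hvne, _, _⟩ := pvKeyOf_some_spec setups k pr.1 pr.2 (by rwa [Prod.mk.eta])
    exact List.mem_filter.2 ⟨(mem_pvEmit ..).2 ⟨hm, hla, hlb, hvne⟩, by simpa using hk⟩

-- length of the columns already covered by the rows before i (Source B's 'covered')
def pvCov (setups : List (List String)) (i : Nat) : Nat :=
  ((List.range i).map (pvLen setups)).foldr max 0

theorem foldr_max_base (l : List Nat) (b : Nat) : l.foldr max b = max (l.foldr max 0) b := by
  induction l with
  | nil => simp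
  | cons x t ih =>
    simp only [List.foldr_cons, ih]
    omega

theorem pvCov_succ (setups : List (List String)) (i : Nat) :
    pvCov setups (i + 1) = max (pvCov setups i) (pvLen setups i) := by
  rw [pvCov, List.range_succ, List.map_append, List.foldr_append]
  simp only [List.map_cons, List.map_nil, List.foldr_cons, List.foldr_nil]
  rw [foldr_max_base, pvCov]
  omega

theorem pvCov_le (setups : List (List String)) (i k : Nat)
    (h : ∀ a < i, pvLen setups a ≤ k) : pvCov setups i ≤ k := by
  induction i with
  | zero => simp [pvCov]
  | succ i ih =>
    rw [pvCov_succ]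
    have := ih (fun a ha => h a (by omega))
    have := h i (by omega)
    omega

theorem pvCov_anchor (setups : List (List String)) (k i0 j0 : Nat)
    (h : pvKeyOf setups k = some (i0, j0)) : pvCov setups i0 ≤ k := by
  obtain ⟨_, _, _, _, _, halla, _⟩ := pvKeyOf_some_spec setups k i0 j0 h
  exact pvCov_le setups i0 k (fun a ha => by have := halla a ha; omega)

-- dedup of the pair-ordered emission (optionally pre-filtered by b, a filter that keeps
-- every column whose first differing pair is the current one) collapses to owned columns
theorem pvDed_blockB (setups : List (List String)) (m : Nat) (b : Nat × Nat → Nat → Bool)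
    (hb : ∀ pr k, pvKeyOf setups k = some pr → b pr k = true) (Q : List (Nat × Nat)) :
    ∀ (acc : List Nat),
      Q.Pairwise pvLexLt →
      (∀ pr ∈ Q, pr ∈ pvP setups.length) →
      (∀ k : Nat, k ∈ acc ↔ ∃ pr', pvKeyOf setups k = some pr' ∧ k < m ∧ pr' ∉ Q) →
      pvDed acc (Q.flatMap (fun pr => (pvEmit setups m pr.1 pr.2).filter (b pr))) =
        acc ++ Q.flatMap (pvOwn setups m) := by
  induction Q with
  | nil => intro acc _ _ _; simp [pvDed]
  | cons pr Q' ih =>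
    intro acc hpw hmem hacc
    rw [List.flatMap_cons, pvDed_append]
    have hhead := (List.pairwise_cons.1 hpw).1
    have hpw' := (List.pairwise_cons.1 hpw).2
    have hprP := hmem pr (List.mem_cons_self ..)
    have hprn := (pvP_mem ..).1 hprP
    have hstep : pvDed acc ((pvEmit setups m pr.1 pr.2).filter (b pr)) = acc ++ pvOwn setups m pr := by
      rw [pvDed_eq_append_pvNew, pvNew_of_nodup _ _ (List.Nodup.filter _ (pvEmit_nodup setups m pr.1 pr.2))]
      rw [List.filter_filter]
      unfold pvOwn
      congr 1
      apply List.filter_congr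
      intro k hk
      obtain ⟨hkm, hki, hkj, hkne⟩ := (mem_pvEmit ..).1 hk
      rw [Bool.eq_iff_iff]
      simp only [Bool.and_eq_true, decide_eq_true_eq]
      constructor
      · rintro ⟨hnacc, hbk⟩
        obtain ⟨pr0, hpr0⟩ := pvKeyOf_complete setups k pr.1 pr.2 hprn.1 hprn.2.1 hprn.2.2 hki hkj hkne
        have hnex : ¬ ∃ pr', pvKeyOf setups k = some pr' ∧ k < m ∧ pr' ∉ pr :: Q' :=
          fun hex => hnacc ((hacc k).2 hex)
        have hin : pr0 ∈ pr :: Q' := by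
          by_contra hni
          exact hnex ⟨pr0, hpr0, hkm, hni⟩
        rcases List.mem_cons.1 hin with heq | hmem'
        · rw [hpr0, heq]
        · exfalso
          obtain ⟨a0, b0⟩ := pr0
          have hlex := hhead _ hmem'
          have hmin := pvKeyOf_min setups k a0 b0 pr.1 pr.2 hpr0 hprn.1 hprn.2.1 hprn.2.2 hki hkj hkne
          unfold pvLexLt at hlex
          simp only at hlex hmin
          omega
      · intro hkey
        refine ⟨fun hkacc => ?_, hb pr k hkey⟩
        obtain ⟨pr', hpr', _, hni⟩ := (hacc k).1 hkacc
        rw [hkey] at hpr'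
        exact hni ((Option.some.inj hpr') ▸ List.mem_cons_self ..)
    rw [hstep]
    have hacc' : ∀ k : Nat, k ∈ acc ++ pvOwn setups m pr ↔
        ∃ pr', pvKeyOf setups k = some pr' ∧ k < m ∧ pr' ∉ Q' := by
      intro k
      simp only [List.mem_append]
      constructor
      · rintro (hk | hk)
        · obtain ⟨pr', h1, h2, h3⟩ := (hacc k).1 hk
          exact ⟨pr', h1, h2, fun hq => h3 (List.mem_cons_of_mem _ hq)⟩
        · obtain ⟨hkm, hkey⟩ := (mem_pvOwn ..).1 hk
          refine ⟨pr, hkey, hkm, fun hq => ?_⟩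
          have hlex := hhead pr hq
          unfold pvLexLt at hlex
          omega
      · rintro ⟨pr', h1, h2, h3⟩
        by_cases hpp : pr' = pr
        · subst hpp
          exact Or.inr ((mem_pvOwn ..).2 ⟨h2, h1⟩)
        · left
          exact (hacc k).2 ⟨pr', h1, h2, by
            intro hin
            rcases List.mem_cons.1 hin with h | h
            · exact hpp h
            · exact h3 h⟩
    rw [ih _ hpw' (fun q hq => hmem q (List.mem_cons_of_mem _ hq)) hacc']
    simp [List.append_assoc]

-- pvOwn vanishes on pairs with pr.1 ≥ pr.2 (a first differing pair always has i < j)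
theorem pvOwn_nil_of_ge (setups : List (List String)) (m : Nat) (pr : Nat × Nat)
    (h : ¬ pr.1 < pr.2) : pvOwn setups m pr = [] := by
  rw [List.eq_nil_iff_forall_not_mem]
  intro k hk
  obtain ⟨_, hkey⟩ := (mem_pvOwn ..).1 hk
  obtain ⟨hab, _⟩ := pvKeyOf_some_spec setups k pr.1 pr.2 (by rwa [Prod.mk.eta])
  exact h hab

theorem flatMap_filter_of_nil {α β : Type} (l : List α) (p : α → Bool) (g : α → List β)
    (h : ∀ x ∈ l, p x = false → g x = []) :
    (l.filter p).flatMap g = l.flatMap g := by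
  induction l with
  | nil => simp
  | cons x t ih =>
    rw [List.filter_cons]
    cases hx : p x with
    | true =>
      simp only [if_true]
      rw [List.flatMap_cons, List.flatMap_cons, ih (fun y hy => h y (List.mem_cons_of_mem _ hy))]
    | false =>
      rw [if_neg (by simp : ¬ (false = true))]
      rw [List.flatMap_cons, h x (List.mem_cons_self ..) hx, List.nil_append]
      exact ih (fun y hy => h y (List.mem_cons_of_mem _ hy))

-- B's traversal order of pairs: i ascending, then j ∈ (i, n)
def pvQB (n : Nat) : List (Nat × Nat) :=
  (List.range n).flatMap (fun i => ((List.range n).filter (fun j => i < j)).map (fun j => (i, j)))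

theorem pvQB_mem (n : Nat) (pr : Nat × Nat) :
    pr ∈ pvQB n ↔ pr.1 < n ∧ pr.2 < n ∧ pr.1 < pr.2 := by
  obtain ⟨a, b⟩ := pr
  simp only [pvQB, List.mem_flatMap, List.mem_map, List.mem_filter, List.mem_range,
    decide_eq_true_eq, Prod.mk.injEq]
  constructor
  · rintro ⟨i, hi, j, ⟨hj, hij⟩, rfl, rfl⟩; exact ⟨hi, hj, hij⟩
  · rintro ⟨ha, hb, hab⟩; exact ⟨a, ha, b, ⟨hb, hab⟩, rfl, rfl⟩

theorem pvQB_pairwise (n : Nat) : (pvQB n).Pairwise pvLexLt := by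
  rw [pvQB, List.pairwise_flatMap]
  constructor
  · intro i _
    refine List.Pairwise.map _ ?_ (List.Pairwise.filter _ (List.pairwise_lt_range))
    intro j1 j2 hj
    exact Or.inr ⟨rfl, hj⟩
  · refine List.Pairwise.imp_of_mem ?_ (List.pairwise_lt_range)
    intro i1 i2 _ _ h12 x hx y hy
    obtain ⟨j1, _, rfl⟩ := List.mem_map.1 hx
    obtain ⟨j2, _, rfl⟩ := List.mem_map.1 hy
    exact Or.inl h12

-- the owned columns of pairs with i > j are empty, so A's pair order collapses to B's
theorem own_pvP_eq_pvQB (setups : List (List String)) (m n : Nat) :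
    (pvP n).flatMap (pvOwn setups m) = (pvQB n).flatMap (pvOwn setups m) := by
  rw [pvP, pvQB, List.flatMap_assoc, List.flatMap_assoc]
  apply List.flatMap_congr
  intro i _
  rw [List.flatMap_map, List.flatMap_map]
  have h1 : (List.range n).filter (fun j => i < j) =
      ((List.range n).filter (fun j => i ≠ j)).filter (fun j => i < j) := by
    rw [List.filter_filter]
    apply List.filter_congr
    intro j _
    rw [Bool.eq_iff_iff]
    simp only [Bool.and_eq_true, decide_eq_true_eq]
    omega
  rw [h1]
  exact flatMap_filter_of_nil ((List.range n).filter (fun j => i ≠ j))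
    (fun j => decide (i < j)) _
    (fun j _ hj => pvOwn_nil_of_ge setups m (i, j) (by simpa using hj)) |>.symm

-- the acc = [] invariant for pvDed_blockB over a pair list containing all first pairs
theorem acc_nil_inv (setups : List (List String)) (m : Nat) (Q : List (Nat × Nat))
    (hQ : ∀ pr : Nat × Nat, pr.1 < pr.2 → pr.2 < setups.length → pr ∈ Q) :
    ∀ k : Nat, k ∈ ([] : List Nat) ↔
      ∃ pr', pvKeyOf setups k = some pr' ∧ k < m ∧ pr' ∉ Q := by
  intro k
  simp only [List.not_mem_nil, false_iff]
  rintro ⟨⟨a, b⟩, h1, _, h3⟩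
  obtain ⟨hab, hbn, _⟩ := pvKeyOf_some_spec setups k a b h1
  exact h3 (hQ (a, b) hab hbn)

theorem dedupA (setups : List (List String)) (m : Nat) :
    pvDed [] ((pvP setups.length).flatMap (fun pr => pvEmit setups m pr.1 pr.2)) =
      (pvP setups.length).flatMap (pvOwn setups m) := by
  have h1 : (pvP setups.length).flatMap (fun pr => pvEmit setups m pr.1 pr.2) =
      (pvP setups.length).flatMap
        (fun pr => (pvEmit setups m pr.1 pr.2).filter (fun _ => true)) := by
    apply List.flatMap_congr
    intro pr _
    rw [List.filter_true]
  rw [h1]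
  have h0 := pvDed_blockB setups m (fun _ _ => true) (fun _ _ _ => rfl) (pvP setups.length)
    [] (pvP_pairwise _) (fun pr h => h)
    (acc_nil_inv setups m _ (fun pr hab hbn => (pvP_mem ..).2 ⟨by omega, hbn, by omega⟩))
  simpa using h0

theorem dedupB (setups : List (List String)) (m : Nat) :
    pvDed [] ((pvQB setups.length).flatMap
        (fun pr => (pvEmit setups m pr.1 pr.2).filter (fun k => pvCov setups pr.1 ≤ k))) =
      (pvQB setups.length).flatMap (pvOwn setups m) := by
  have h0 := pvDed_blockB setups m (fun pr k => decide (pvCov setups pr.1 ≤ k))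
    (fun pr k hk => by
      simpa using pvCov_anchor setups k pr.1 pr.2 (by rwa [Prod.mk.eta]))
    (pvQB setups.length) [] (pvQB_pairwise _)
    (fun pr h => by
      obtain ⟨h1, h2, h3⟩ := (pvQB_mem ..).1 h
      exact (pvP_mem ..).2 ⟨h1, h2, by omega⟩)
    (acc_nil_inv setups m _ (fun pr hab hbn => (pvQB_mem ..).2 ⟨by omega, hbn, hab⟩))
  simpa using h0

-- ----- normal form of port B -----
theorem contains_foldl_add (F : List Nat) (seen : PySem.Set Int) (x : Int) :
    PySem.Set.contains (F.foldl (fun s k => PySem.Set.add s ((k : Nat) : Int)) seen) x = true ↔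
      PySem.Set.contains seen x = true ∨ ∃ k ∈ F, ((k : Nat) : Int) = x := by
  induction F generalizing seen with
  | nil => simp
  | cons k F ih =>
    rw [List.foldl_cons, ih]
    simp only [PySem.Set.contains_iff, PySem.Set.mem_add, List.mem_cons]
    aesop

theorem eq_of_mem_pairwise_lt {α : Type} [LinearOrder α] (l1 l2 : List α)
    (h1 : l1.Pairwise (· < ·)) (h2 : l2.Pairwise (· < ·)) (hm : ∀ x, x ∈ l1 ↔ x ∈ l2) :
    l1 = l2 := by
  have n1 : l1.Nodup := h1.imp ne_of_lt
  have n2 : l2.Nodup := h2.imp ne_of_lt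
  exact ((List.perm_ext_iff_of_nodup n1 n2).mpr hm).eq_of_pairwise
    (fun a b _ _ hab hba => absurd hba (lt_asymm hab)) h1 h2

-- column candidates of the pair (i, j) in Source B: block ∩ {covered by row j, differing}
def pvCandJ (setups : List (List String)) (m i j : Nat) : List Nat :=
  (pvEmit setups m i j).filter (fun k => pvCov setups i ≤ k)

-- Source B's block for row i, as a Nat list
def pvBL (setups : List (List String)) (m i : Nat) : List Nat :=
  (List.range (min (pvLen setups i) m - pvCov setups i)).map (fun t => pvCov setups i + t)

def pvJL (n i : Nat) : List Nat := (List.range (n - (i + 1))).map (fun t => i + 1 + t)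

def pvCandI (setups : List (List String)) (m n i : Nat) : List Nat :=
  (pvJL n i).flatMap (pvCandJ setups m i)

theorem pvBL_nodup (setups : List (List String)) (m i : Nat) : (pvBL setups m i).Nodup := by
  refine List.Nodup.map ?_ List.nodup_range
  intro a b h
  have h2 : pvCov setups i + a = pvCov setups i + b := h
  omega

theorem blockFilter (setups : List (List String)) (m i j : Nat) :
    (pvBL setups m i).filter
      (fun k => decide (k < pvLen setups j) && decide (pvVal setups k i ≠ pvVal setups k j))
      = pvCandJ setups m i j := by
  apply eq_of_mem_pairwise_lt
  · refine List.Pairwise.filter _ (List.Pairwise.map _ ?_ List.pairwise_lt_range)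
    intro a b h
    show pvCov setups i + a < pvCov setups i + b
    omega
  · exact List.Pairwise.filter _ (List.Pairwise.filter _ List.pairwise_lt_range)
  · intro k
    simp only [pvBL, pvCandJ, pvEmit, List.mem_filter, List.mem_map, List.mem_range,
      Bool.and_eq_true, decide_eq_true_eq, Nat.lt_min]
    constructor
    · rintro ⟨⟨t, ht, rfl⟩, hlj, hne⟩
      exact ⟨⟨⟨by omega, by omega, hlj⟩, hne⟩, by omega⟩
    · rintro ⟨⟨⟨hm', hli, hlj⟩, hne⟩, hC⟩
      exact ⟨⟨k - pvCov setups i, by omega, by omega⟩, hlj, hne⟩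

theorem range_filter_lt (n i : Nat) :
    (List.range n).filter (fun j => i < j) = pvJL n i := by
  induction n with
  | zero => simp [pvJL]
  | succ n ih =>
    rw [List.range_succ, List.filter_append, ih]
    by_cases h : i < n
    · have h2 : n + 1 - (i + 1) = (n - (i + 1)) + 1 := by omega
      have hf : (List.filter (fun j => decide (i < j)) [n]) = [n] := by simp [h]
      show List.map (fun t => i + 1 + t) (List.range (n - (i + 1))) ++ _ =
        List.map (fun t => i + 1 + t) (List.range (n + 1 - (i + 1)))
      rw [hf, h2, List.range_succ, List.map_append]
      simp [show i + 1 + (n - (i + 1)) = n by omega]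
    · have h2 : n + 1 - (i + 1) = n - (i + 1) := by omega
      have hf : (List.filter (fun j => decide (i < j)) [n]) = [] := by
        simp [List.filter_cons, h]
      show List.map (fun t => i + 1 + t) (List.range (n - (i + 1))) ++ _ =
        List.map (fun t => i + 1 + t) (List.range (n + 1 - (i + 1)))
      rw [hf, h2, List.append_nil]

-- the new-element sequence of a list of rounds, threading the already-seen set
def pvSeqRounds (cand : Nat → List Nat) (rs : List Nat) (Dacc : List Nat) : List Nat :=
  match rs with
  | [] => []
  | r :: t => pvNew Dacc (cand r) ++ pvSeqRounds cand t (Dacc ++ pvNew Dacc (cand r))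

theorem pvSeqRounds_ded (cand : Nat → List Nat) (rs : List Nat) :
    ∀ Dacc : List Nat, Dacc ++ pvSeqRounds cand rs Dacc = pvDed Dacc (rs.flatMap cand) := by
  induction rs with
  | nil => intro Dacc; simp [pvSeqRounds, pvDed]
  | cons r t ih =>
    intro Dacc
    rw [List.flatMap_cons, pvDed_append, ← ih (pvDed Dacc (cand r)),
      pvDed_eq_append_pvNew Dacc (cand r)]
    show Dacc ++ (pvNew Dacc (cand r) ++ pvSeqRounds cand t (Dacc ++ pvNew Dacc (cand r))) = _
    rw [List.append_assoc]

theorem enum_eq_map (xs : List (List String)) : ∀ (s : Int),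
    PySem.List.enumerate xs s =
      (List.range xs.length).map (fun (t : Nat) => (s + (t : Int), xs.getD t [])) := by
  induction xs with
  | nil => intro s; simp [PySem.List.enumerate]
  | cons x t ih =>
    intro s
    rw [PySem.List.enumerate_cons, ih (s + 1), List.length_cons, List.range_succ_eq_map,
      List.map_cons, List.map_map]
    congr 1
    · simp
    · apply List.map_congr_left
      intro t' _
      simp only [Function.comp_apply, List.getD_cons_succ]
      congr 1
      push_cast
      ring

-- closed form of Source B's innermost loop (one row j against the block), over Nat indices
theorem roundFoldN (ref row oc : List String) (l : List Nat) :
    ∀ (seen : PySem.Set Int) (out : List String), l.Nodup →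
    (l.map (fun (k : Nat) => (k : Int))).foldl
      (fun (st3 : PySem.Set Int × List String) (k : Int) =>
        if k < (row.length : Int) ∧ ¬ PySem.Set.contains st3.1 k = true ∧
            PySem.List.pyGetD ref k "" ≠ PySem.List.pyGetD row k "" then
          (PySem.Set.add st3.1 k,
           let column := PySem.List.pyGetD oc k ""
           if column ∈ st3.2 then st3.2 else st3.2 ++ [column])
        else st3) (seen, out)
    = ((l.filter (fun (kN : Nat) => decide (((kN : Int)) < (row.length : Int)) &&
          !PySem.Set.contains seen ((kN : Int)) &&
          decide (PySem.List.pyGetD ref ((kN : Int)) "" ≠ PySem.List.pyGetD row ((kN : Int)) ""))).foldl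
        (fun s (kN : Nat) => PySem.Set.add s ((kN : Int))) seen,
       pvDed out ((l.filter (fun (kN : Nat) => decide (((kN : Int)) < (row.length : Int)) &&
          !PySem.Set.contains seen ((kN : Int)) &&
          decide (PySem.List.pyGetD ref ((kN : Int)) "" ≠ PySem.List.pyGetD row ((kN : Int)) ""))).map
        (fun (kN : Nat) => PySem.List.pyGetD oc ((kN : Int)) ""))) := by
  induction l with
  | nil => intro seen out _; simp [pvDed]
  | cons k l ih =>
    intro seen out hnd
    have hkl : k ∉ l := (List.nodup_cons.1 hnd).1
    have hnd' : l.Nodup := (List.nodup_cons.1 hnd).2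
    rw [List.map_cons, List.foldl_cons, List.filter_cons]
    simp only []
    by_cases hg : ((k : Int)) < (row.length : Int) ∧ ¬ PySem.Set.contains seen ((k : Int)) = true ∧
        PySem.List.pyGetD ref ((k : Int)) "" ≠ PySem.List.pyGetD row ((k : Int)) ""
    · have hb : (decide (((k : Int)) < (row.length : Int)) &&
          !PySem.Set.contains seen ((k : Int)) &&
          decide (PySem.List.pyGetD ref ((k : Int)) "" ≠ PySem.List.pyGetD row ((k : Int)) "")) = true := by
        simp only [Bool.and_eq_true, Bool.not_eq_true', decide_eq_true_eq]
        exact ⟨⟨hg.1, eq_false_of_ne_true hg.2.1⟩, hg.2.2⟩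
      rw [if_pos hb, if_pos hg]
      have hfeq : l.filter (fun (kN : Nat) => decide (((kN : Int)) < (row.length : Int)) &&
            !PySem.Set.contains (PySem.Set.add seen ((k : Int))) ((kN : Int)) &&
            decide (PySem.List.pyGetD ref ((kN : Int)) "" ≠ PySem.List.pyGetD row ((kN : Int)) "")) =
          l.filter (fun (kN : Nat) => decide (((kN : Int)) < (row.length : Int)) &&
            !PySem.Set.contains seen ((kN : Int)) &&
            decide (PySem.List.pyGetD ref ((kN : Int)) "" ≠ PySem.List.pyGetD row ((kN : Int)) "")) := by
        apply List.filter_congr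
        intro k' hk'
        have hcc : PySem.Set.contains (PySem.Set.add seen ((k : Int))) ((k' : Int)) =
            PySem.Set.contains seen ((k' : Int)) := by
          rw [Bool.eq_iff_iff, PySem.Set.contains_iff, PySem.Set.contains_iff, PySem.Set.mem_add]
          constructor
          · rintro (h | h)
            · exact h
            · exfalso
              have hk'k : k' = k := by exact_mod_cast h
              exact hkl (hk'k ▸ hk')
          · exact Or.inl
        rw [hcc]
      rw [ih (PySem.Set.add seen ((k : Int))) _ hnd', hfeq]
      rfl
    · have hb : (decide (((k : Int)) < (row.length : Int)) &&
          !PySem.Set.contains seen ((k : Int)) &&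
          decide (PySem.List.pyGetD ref ((k : Int)) "" ≠ PySem.List.pyGetD row ((k : Int)) "")) = false := by
        rw [Bool.eq_false_iff]
        intro hc
        simp only [Bool.and_eq_true, Bool.not_eq_true', decide_eq_true_eq] at hc
        exact hg ⟨hc.1.1, by rw [hc.1.2]; exact Bool.false_ne_true, hc.2⟩
      rw [hb, if_neg (by simp : ¬ (false = true)), if_neg hg]
      exact ih seen out hnd'

-- Source B's per-row-j candidate filter equals the block filtered by row j's reach and value
theorem blockFilter2 (setups : List (List String)) (m i j : Nat) :
    (pvBL setups m i).filter
      (fun (k : Nat) => decide (k < (setups.getD j []).length) &&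
        decide ((setups.getD i []).getD k "" ≠ (setups.getD j []).getD k ""))
      = pvCandJ setups m i j := by
  have h := blockFilter setups m i j
  unfold pvLen pvVal at h
  exact h

theorem jRec (setups : List (List String)) (oc : List String) (i : Nat) :
    ∀ (js : List Nat) (Dacc : List Nat) (seen : PySem.Set Int) (out : List String),
    (∀ k : Nat, PySem.Set.contains seen ((k : Int)) = decide (k ∈ Dacc)) →
    (js.map (fun (j : Nat) => (j : Int))).foldl
      (fun (st2 : PySem.Set Int × List String) j =>
        let row := PySem.List.pyGetD setups j []
        ((pvBL setups oc.length i).map (fun (k : Nat) => (k : Int))).foldl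
          (fun (st3 : PySem.Set Int × List String) (k : Int) =>
            if k < (row.length : Int) ∧ ¬ PySem.Set.contains st3.1 k = true ∧
                PySem.List.pyGetD (setups.getD i []) k "" ≠ PySem.List.pyGetD row k "" then
              (PySem.Set.add st3.1 k,
               let column := PySem.List.pyGetD oc k ""
               if column ∈ st3.2 then st3.2 else st3.2 ++ [column])
            else st3) st2) (seen, out)
    = ((pvSeqRounds (pvCandJ setups oc.length i) js Dacc).foldl
         (fun se (k : Nat) => PySem.Set.add se ((k : Int))) seen,
       pvDed out ((pvSeqRounds (pvCandJ setups oc.length i) js Dacc).map (fun k => oc.getD k ""))) := by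
  intro js
  induction js with
  | nil =>
    intro Dacc seen out _
    simp [pvSeqRounds, pvDed]
  | cons j t ih =>
    intro Dacc seen out hseen
    rw [List.map_cons, List.foldl_cons]
    simp only [PySem.List.pyGetD_natCast]
    rw [roundFoldN (setups.getD i []) (setups.getD j []) oc (pvBL setups oc.length i)
      seen out (pvBL_nodup setups oc.length i)]
    have hF : (pvBL setups oc.length i).filter
        (fun (kN : Nat) => decide (((kN : Int)) < ((setups.getD j []).length : Int)) &&
          !PySem.Set.contains seen ((kN : Int)) &&
          decide (PySem.List.pyGetD (setups.getD i []) ((kN : Int)) "" ≠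
            PySem.List.pyGetD (setups.getD j []) ((kN : Int)) "")) =
        pvNew Dacc (pvCandJ setups oc.length i j) := by
      rw [← blockFilter2 setups oc.length i j,
        pvNew_of_nodup _ _ (List.Nodup.filter _ (pvBL_nodup setups oc.length i)),
        List.filter_filter]
      apply List.filter_congr
      intro k _
      rw [Bool.eq_iff_iff]
      simp only [Bool.and_eq_true, Bool.not_eq_true', decide_eq_true_eq,
        PySem.List.pyGetD_natCast, Nat.cast_lt, hseen k, decide_eq_false_iff_not]
      tauto
    rw [hF]
    simp only [PySem.List.pyGetD_natCast]
    have hseen' : ∀ k : Nat,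
        PySem.Set.contains ((pvNew Dacc (pvCandJ setups oc.length i j)).foldl
          (fun se (kN : Nat) => PySem.Set.add se ((kN : Int))) seen) ((k : Int)) =
        decide (k ∈ Dacc ++ pvNew Dacc (pvCandJ setups oc.length i j)) := by
      intro k
      rw [Bool.eq_iff_iff, contains_foldl_add, hseen k]
      simp only [decide_eq_true_eq, List.mem_append]
      constructor
      · rintro (h | ⟨k', hk', hke⟩)
        · exact Or.inl h
        · have : k' = k := by exact_mod_cast hke
          exact Or.inr (this ▸ hk')
      · rintro (h | h)
        · exact Or.inl h
        · exact Or.inr ⟨k, h, rfl⟩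
    rw [ih _ _ _ hseen']
    show _ = ((pvNew Dacc (pvCandJ setups oc.length i j) ++
        pvSeqRounds (pvCandJ setups oc.length i) t
          (Dacc ++ pvNew Dacc (pvCandJ setups oc.length i j))).foldl _ seen,
      pvDed out ((pvNew Dacc (pvCandJ setups oc.length i j) ++
        pvSeqRounds (pvCandJ setups oc.length i) t
          (Dacc ++ pvNew Dacc (pvCandJ setups oc.length i j))).map (fun k => oc.getD k "")))
    rw [List.foldl_append, List.map_append, pvDed_append]

theorem blockCast (setups : List (List String)) (oc : List String) (s : Nat) :
    PySem.List.pyRange ((pvCov setups s : Nat) : Int)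
      (min (((setups.getD s []).length : Nat) : Int) ((oc.length : Nat) : Int)) 1
    = (pvBL setups oc.length s).map (fun (k : Nat) => (k : Int)) := by
  rw [PySem.List.pyRange_one, pvBL]
  have h1 : ((min ((setups.getD s []).length : Int) (oc.length : Int)) - (pvCov setups s : Int)).toNat
      = min (pvLen setups s) oc.length - pvCov setups s := by
    unfold pvLen
    omega
  rw [h1, List.map_map]
  apply List.map_congr_left
  intro t _
  simp only [Function.comp_apply]
  push_cast
  ring

theorem jrangeCast (n s : Nat) :
    PySem.List.pyRange (((s : Nat) : Int) + 1) ((n : Nat) : Int) 1 =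
      (pvJL n s).map (fun (j : Nat) => (j : Int)) := by
  rw [PySem.List.pyRange_one, pvJL, List.map_map]
  have h1 : (((n : Nat) : Int) - (((s : Nat) : Int) + 1)).toNat = n - (s + 1) := by omega
  rw [h1]
  apply List.map_congr_left
  intro t _
  simp only [Function.comp_apply]
  push_cast
  ring

theorem covCast (setups : List (List String)) (s : Nat) :
    max ((pvCov setups s : Nat) : Int) (((setups.getD s []).length : Nat) : Int) =
      ((pvCov setups (s + 1) : Nat) : Int) := by
  rw [pvCov_succ]
  unfold pvLen
  push_cast
  rfl

theorem segJ_eq_pvNew (setups : List (List String)) (m n s : Nat) (Dacc : List Nat) :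
    pvSeqRounds (pvCandJ setups m s) (pvJL n s) Dacc = pvNew Dacc (pvCandI setups m n s) := by
  apply List.append_cancel_left (as := Dacc)
  rw [pvSeqRounds_ded, ← pvDed_eq_append_pvNew]
  rfl

theorem outerRec (setups : List (List String)) (oc : List String) :
    ∀ (t s : Nat) (Dacc : List Nat) (seen : PySem.Set Int) (out : List String),
    (∀ k : Nat, PySem.Set.contains seen ((k : Int)) = decide (k ∈ Dacc)) →
    ((List.range' s t).map (fun (i : Nat) => ((i : Int), setups.getD i []))).foldl
      (fun (st : (PySem.Set Int × List String) × Int) p =>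
        let block := PySem.List.pyRange st.2 (min (p.2.length : Int) (oc.length : Int)) 1
        let covered := max st.2 (p.2.length : Int)
        ((PySem.List.pyRange (p.1 + 1) (setups.length : Int) 1).foldl
          (fun (st2 : PySem.Set Int × List String) j =>
            let row := PySem.List.pyGetD setups j []
            block.foldl
              (fun (st3 : PySem.Set Int × List String) (k : Int) =>
                if k < (row.length : Int) ∧ ¬ PySem.Set.contains st3.1 k = true ∧
                    PySem.List.pyGetD p.2 k "" ≠ PySem.List.pyGetD row k "" then
                  (PySem.Set.add st3.1 k,
                   let column := PySem.List.pyGetD oc k ""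
                   if column ∈ st3.2 then st3.2 else st3.2 ++ [column])
                else st3) st2) st.1, covered))
      ((seen, out), ((pvCov setups s : Nat) : Int))
    = (((pvSeqRounds (fun i => pvCandI setups oc.length setups.length i) (List.range' s t) Dacc).foldl
          (fun se (k : Nat) => PySem.Set.add se ((k : Int))) seen,
        pvDed out ((pvSeqRounds (fun i => pvCandI setups oc.length setups.length i)
          (List.range' s t) Dacc).map (fun k => oc.getD k ""))),
       ((pvCov setups (s + t) : Nat) : Int)) := by
  intro t
  induction t with
  | zero =>
    intro s Dacc seen out _
    simp [pvSeqRounds, pvDed]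
  | succ t ih =>
    intro s Dacc seen out hseen
    rw [List.range'_succ, List.map_cons, List.foldl_cons]
    simp only []
    rw [blockCast setups oc s, jrangeCast setups.length s,
      jRec setups oc s (pvJL setups.length s) Dacc seen out hseen, covCast setups s]
    have hseg := segJ_eq_pvNew setups oc.length setups.length s Dacc
    rw [hseg]
    have hseen' : ∀ k : Nat,
        PySem.Set.contains ((pvNew Dacc (pvCandI setups oc.length setups.length s)).foldl
          (fun se (kN : Nat) => PySem.Set.add se ((kN : Int))) seen) ((k : Int)) =
        decide (k ∈ Dacc ++ pvNew Dacc (pvCandI setups oc.length setups.length s)) := by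
      intro k
      rw [Bool.eq_iff_iff, contains_foldl_add, hseen k]
      simp only [decide_eq_true_eq, List.mem_append]
      constructor
      · rintro (h | ⟨k', hk', hke⟩)
        · exact Or.inl h
        · have : k' = k := by exact_mod_cast hke
          exact Or.inr (this ▸ hk')
      · rintro (h | h)
        · exact Or.inl h
        · exact Or.inr ⟨k, h, rfl⟩
    rw [ih (s + 1) (Dacc ++ pvNew Dacc (pvCandI setups oc.length setups.length s)) _ _ hseen']
    show _ = (((pvNew Dacc (pvCandI setups oc.length setups.length s) ++
        pvSeqRounds (fun i => pvCandI setups oc.length setups.length i) (List.range' (s + 1) t)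
          (Dacc ++ pvNew Dacc (pvCandI setups oc.length setups.length s))).foldl _ seen,
      pvDed out ((pvNew Dacc (pvCandI setups oc.length setups.length s) ++
        pvSeqRounds (fun i => pvCandI setups oc.length setups.length i) (List.range' (s + 1) t)
          (Dacc ++ pvNew Dacc (pvCandI setups oc.length setups.length s))).map
        (fun k => oc.getD k ""))), _)
    rw [List.foldl_append, List.map_append, pvDed_append]
    have hsum : s + 1 + t = s + (t + 1) := by omega
    rw [hsum]

theorem portB_eq (setups : List (List String)) (oc : List String) :
    list_columns_that_vary_between_setups_alt setups oc =
      pvDed [] ((pvSeqRounds (fun i => pvCandI setups oc.length setups.length i)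
        (List.range' 0 setups.length) []).map (fun k => oc.getD k "")) := by
  have hseen0 : ∀ k : Nat,
      PySem.Set.contains PySem.Set.empty ((k : Int)) = decide (k ∈ ([] : List Nat)) := by
    intro k
    simp
  simp only [list_columns_that_vary_between_setups_alt]
  rw [show PySem.List.enumerate setups = PySem.List.enumerate setups 0 from rfl,
    enum_eq_map setups 0]
  simp only [zero_add]
  rw [List.range_eq_range']
  rw [show (0 : Int) = ((pvCov setups 0 : Nat) : Int) from rfl]
  rw [outerRec setups oc setups.length 0 [] PySem.Set.empty [] hseen0]

-- ===== VERDICT (by name: the statement is the Claim_ definition above) =====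
theorem list_columns_that_vary_between_setups_spec : Claim_equal_list_columns_that_vary_between_setups := by
  intro setups oc _
  show _ = _
  have hseq : pvSeqRounds (fun i => pvCandI setups oc.length setups.length i)
      (List.range' 0 setups.length) [] =
      pvDed [] ((List.range' 0 setups.length).flatMap
        (fun i => pvCandI setups oc.length setups.length i)) := by
    have h := pvSeqRounds_ded (fun i => pvCandI setups oc.length setups.length i)
      (List.range' 0 setups.length) []
    simpa using h
  have hflat : (pvQB setups.length).flatMap
      (fun pr => (pvEmit setups oc.length pr.1 pr.2).filter (fun k => pvCov setups pr.1 ≤ k)) =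
      (List.range' 0 setups.length).flatMap
        (fun i => pvCandI setups oc.length setups.length i) := by
    rw [← List.range_eq_range']
    rw [pvQB, List.flatMap_assoc]
    apply List.flatMap_congr
    intro i _
    rw [List.flatMap_map, range_filter_lt setups.length i]
    rfl
  rw [portA_eq, portB_eq, hseq]
  rw [← pvDed_map (fun k => oc.getD k "")
    ((pvP setups.length).flatMap (fun pr => pvEmit setups oc.length pr.1 pr.2))]
  rw [dedupA setups oc.length, own_pvP_eq_pvQB setups oc.length setups.length,
    ← dedupB setups oc.length, pvDed_map, pvDed_map, hflat]
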